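-- pv_equiv track=rewrite | github.com/tadeephuy/medical-chatbot | symptoms_ent/utils.py | create_updated_kb
-- ===== SOURCE A (Python) =====
-- def create_updated_kb(data, opt):
--     '''
--         Return a list of object
--     '''
--     res = []
--     for sample in data:
--         ss = {
--             'source': refine_text(sample),
--             'relation': 'symptom',
--             'target': opt,
--             'original_text': 'Empty'
--         }
--         if ss not in res:
--             res.append(ss)
--
--     return res
--
-- def refine_text(s):
--     s = s.replace('.','').replace('\n','').strip()
--     return s
-- ===== SOURCE B (Python) =====
-- def refine_text(s):
--     return s.replace('.', '').replace('\n', '').strip()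
--
-- def create_updated_kb(data, opt):
--     unique = list(dict.fromkeys(refine_text(s) for s in data))
--     return [{'source': src, 'relation': 'symptom', 'target': opt,
--              'original_text': 'Empty'} for src in unique]
-- ===== Notes on version B (the rewrite author's own statement) =====
-- stated objective: simpler
-- what changed: B splits A's single interleaved build-and-linear-scan loop into two passes: first dedup the refined source strings in first-seen order via dict.fromkeys, then map each unique source to its record; membership is checked on strings instead of whole dicts.
import Mathlib
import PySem

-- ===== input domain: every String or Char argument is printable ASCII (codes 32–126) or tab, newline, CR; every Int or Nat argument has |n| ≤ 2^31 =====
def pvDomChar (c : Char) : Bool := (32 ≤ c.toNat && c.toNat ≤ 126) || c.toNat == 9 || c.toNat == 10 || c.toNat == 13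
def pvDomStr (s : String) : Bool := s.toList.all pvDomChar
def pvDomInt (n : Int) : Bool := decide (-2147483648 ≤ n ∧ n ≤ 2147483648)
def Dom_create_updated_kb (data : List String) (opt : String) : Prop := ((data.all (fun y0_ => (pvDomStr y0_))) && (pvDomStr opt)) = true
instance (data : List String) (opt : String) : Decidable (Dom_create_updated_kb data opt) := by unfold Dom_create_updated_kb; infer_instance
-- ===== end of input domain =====

-- B splits A's interleaved build-and-membership-scan loop into a dedup-the-refined-strings pass followed by a map to records (objective: simpler).

-- ===== PORT A =====
-- helper refine_text (shared verbatim by both Pythons)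
def refine_text (s : String) : String :=
  PySem.Str.strip (PySem.Str.replace (PySem.Str.replace s "." "") "\n" "")

def create_updated_kb (data : List String) (opt : String) : List (List (String × String)) :=
  data.foldl (fun res sample =>
    let ss : List (String × String) :=
      [("source", refine_text sample), ("relation", "symptom"),
       ("target", opt), ("original_text", "Empty")]
    if ss ∈ res then res else res ++ [ss]) []

-- ===== PORT B =====
def kbRecord (opt src : String) : List (String × String) :=
  [("source", src), ("relation", "symptom"), ("target", opt), ("original_text", "Empty")]

def create_updated_kb_alt (data : List String) (opt : String) : List (List (String × String)) :=
  (PySem.List.dedup (data.map refine_text)).map (kbRecord opt)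

-- ===== PRECONDITION & SPEC =====
def Spec_create_updated_kb (data : List String) (opt : String) (out : List (List (String × String))) : Prop := out = create_updated_kb_alt data opt
instance (data : List String) (opt : String) (out : List (List (String × String))) : Decidable (Spec_create_updated_kb data opt out) := by unfold Spec_create_updated_kb; infer_instance

-- ===== CLAIM (what is proved, stated in full; the proofs are below) =====
def Claim_equal_create_updated_kb : Prop := ∀ (data : List String) (opt : String), Dom_create_updated_kb data opt → Spec_create_updated_kb data opt (create_updated_kb data opt)

-- ===== LEMMAS AND PROOFS =====

theorem kbRecord_inj (opt : String) {a b : String} (h : kbRecord opt a = kbRecord opt b) : a = b := by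
  simpa [kbRecord] using h

theorem mem_map_kbRecord (opt s : String) (l : List String) :
    kbRecord opt s ∈ l.map (kbRecord opt) ↔ s ∈ l := by
  constructor
  · intro h
    rcases List.mem_map.1 h with ⟨t, ht, he⟩
    exact (kbRecord_inj opt he.symm) ▸ ht
  · exact fun h => List.mem_map_of_mem h

theorem foldl_kb (opt : String) (data : List String) (seen : List String) :
    data.foldl (fun res sample =>
      let ss : List (String × String) :=
        [("source", refine_text sample), ("relation", "symptom"),
         ("target", opt), ("original_text", "Empty")]
      if ss ∈ res then res else res ++ [ss]) (seen.map (kbRecord opt))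
    = ((data.map refine_text).foldl PySem.Set.add seen).map (kbRecord opt) := by
  induction data generalizing seen with
  | nil => simp
  | cons x xs ih =>
    have hmem : ([("source", refine_text x), ("relation", "symptom"),
        ("target", opt), ("original_text", "Empty")] ∈ seen.map (kbRecord opt))
        ↔ refine_text x ∈ seen := mem_map_kbRecord opt (refine_text x) seen
    simp only [List.foldl_cons, List.map_cons]
    by_cases h : refine_text x ∈ seen
    · rw [if_pos (hmem.2 h)]
      have : PySem.Set.add seen (refine_text x) = seen := by
        simp [PySem.Set.add, PySem.Set.contains, h]
      rw [ih seen, this]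
    · rw [if_neg (fun hc => h (hmem.1 hc))]
      have hadd : PySem.Set.add seen (refine_text x) = seen ++ [refine_text x] := by
        simp [PySem.Set.add, PySem.Set.contains, h]
      have : seen.map (kbRecord opt) ++
          [[("source", refine_text x), ("relation", "symptom"),
            ("target", opt), ("original_text", "Empty")]]
          = (seen ++ [refine_text x]).map (kbRecord opt) := by
        simp [kbRecord]
      rw [this, ih (seen ++ [refine_text x]), hadd]

-- ===== VERDICT (by name: the statement is the Claim_ definition above) =====
theorem create_updated_kb_spec : Claim_equal_create_updated_kb := by
  intro data opt _
  show create_updated_kb data opt = create_updated_kb_alt data opt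
  have := foldl_kb opt data []
  simpa [create_updated_kb, create_updated_kb_alt, PySem.List.dedup_eq_ofList,
    PySem.Set.ofList_eq_foldl] using this
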